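-- pv_equiv track=rewrite | github.com/Adytzuma/casino-bot | pag/paginator.py | _explode_on_any
-- ===== SOURCE A (Python) =====
-- from typing import List
--
-- def _explode_on_any(string) -> List[str]:
--     # Ensure each occurrence is only once, but cast to list as that is faster to traverse.
--     # Python has faster locals access than globals.
--     boundary_chars = [*{
--         ' ',
--         '\t',
--         '\r',
--         '\n',
--         ', ',
--         '; ',
--         '. ',
--         '-',
--         '! ',
--         '? ',
--         ') ',
--         '] ',
--         '} '
--     }]
--
--     # Linked list makes thousands of allocs less expensive, as it is less likely
--     # to require a large block be realloced.
--     bits = []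
--
--     for c in string:
--         if not bits or any(bits[-1].endswith(c) for c in boundary_chars):
--             # Start a new buffer.
--             bits.append('')
--         # Append (gonna be godawful slow)
--         bits[-1] += c
--
--     return list(bits)
-- ===== SOURCE B (Python) =====
-- from typing import List
--
-- def _explode_on_any(string) -> List[str]:
--     # Staged algorithm: every segment boundary in A reduces (for strings) to
--     # "previous char is one of these", so compute all cut positions first,
--     # then slice the string between consecutive cuts.
--     breakers = " \t\r\n-"
--     cuts = [i + 1 for i, c in enumerate(string) if c in breakers]
--     bounds = zip([0] + cuts, cuts + [len(string)])
--     return [string[a:b] for a, b in bounds if a < b]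
-- ===== Notes on version B (the rewrite author's own statement) =====
-- stated objective: faster
-- what changed: Replaces A's per-character buffer loop (which re-tests the growing last segment with endswith against 13 boundary strings at every step) by a staged algorithm: one pass collecting cut positions via a single-char membership test (for a string, 'ends with one of the 13 boundaries' is exactly 'last char is one of 5 breaker chars'), then slicing the string between consecutive cuts.
import Mathlib
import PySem

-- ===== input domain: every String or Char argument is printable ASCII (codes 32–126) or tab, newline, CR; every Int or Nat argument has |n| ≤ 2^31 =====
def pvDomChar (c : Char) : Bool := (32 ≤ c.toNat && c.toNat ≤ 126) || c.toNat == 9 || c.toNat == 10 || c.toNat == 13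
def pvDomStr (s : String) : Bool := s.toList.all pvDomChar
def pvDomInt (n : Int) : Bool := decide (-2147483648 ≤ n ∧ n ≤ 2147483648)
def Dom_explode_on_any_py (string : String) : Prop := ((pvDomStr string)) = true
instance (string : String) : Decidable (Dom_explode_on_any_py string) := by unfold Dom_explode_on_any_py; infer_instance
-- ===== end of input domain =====

-- B replaces A's incremental buffer-per-character loop by a staged algorithm: compute all
-- cut positions first (on a string, A's endswith-any test reduces to "previous char is a
-- breaker"), then slice between consecutive cuts; equivalence of return values is proved below.

-- ===== PORT A =====
-- A's boundary list (the Python set literal, in written order; only used under `any`).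
def pvBoundaryA : List String := [" ", "\t", "\r", "\n", ", ", "; ", ". ", "-", "! ", "? ", ") ", "] ", "} "]

-- A's loop body; `bits` is kept in reverse (head = Python's bits[-1]) so that
-- bits[-1] access/update is structural; the port reverses at the end.
def pvStepA (bits : List String) (c : Char) : List String :=
  let bits := if bits.isEmpty || pvBoundaryA.any (fun b => PySem.Str.endswith (bits.headD "") b)
              then "" :: bits else bits
  ((bits.headD "").push c) :: bits.tail

def explode_on_any_py (string : String) : List String :=
  (string.toList.foldl pvStepA []).reverse

-- ===== PORT B =====
def pvBreakers : List Char := [' ', '\t', '\r', '\n', '-']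

-- cuts = [i + 1 for i, c in enumerate(string) if c in breakers]
def pvCuts (l : List Char) : List Int :=
  (PySem.List.enumerate l).filterMap (fun p => if p.2 ∈ pvBreakers then some (p.1 + 1) else none)

def explode_on_any_py_alt (string : String) : List String :=
  let l := string.toList
  let cuts := pvCuts l
  let bounds := ((0 : Int) :: cuts).zip (cuts ++ [(l.length : Int)])
  bounds.filterMap (fun p =>
    if p.1 < p.2 then some (String.ofList (PySem.List.slice l (some p.1) (some p.2))) else none)

-- ===== PRECONDITION & SPEC =====
def Spec_explode_on_any_py (string : String) (out : List String) : Prop := out = explode_on_any_py_alt string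
instance (string : String) (out : List String) : Decidable (Spec_explode_on_any_py string out) := by unfold Spec_explode_on_any_py; infer_instance

-- ===== CLAIM (what is proved, stated in full; the proofs are below) =====
def Claim_equal_explode_on_any_py : Prop := ∀ (string : String), Dom_explode_on_any_py string → Spec_explode_on_any_py string (explode_on_any_py string)

-- ===== LEMMAS AND PROOFS =====

-- The common reference segmentation: a segment closes right after a breaker char.
def pvSegs : List Char → List (List Char)
  | [] => []
  | c :: l =>
    if c ∈ pvBreakers then [c] :: pvSegs l
    else match pvSegs l with
         | [] => [[c]]
         | s :: r => (c :: s) :: r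

def pvGlue (s : List Char) : List (List Char) → List (List Char)
  | [] => [s]
  | t :: r => (s ++ t) :: r

lemma pvSegs_cons_not (c : Char) (l : List Char) (h : c ∉ pvBreakers) :
    pvSegs (c :: l) = pvGlue [c] (pvSegs l) := by
  simp only [pvSegs, if_neg h]
  cases pvSegs l <;> simp [pvGlue]

lemma pvGlue_glue (s t : List Char) (X : List (List Char)) :
    pvGlue s (pvGlue t X) = pvGlue (s ++ t) X := by
  cases X <;> simp [pvGlue]

-- A's boundary strings, as char lists.
def pvBoundaryL : List (List Char) :=
  [[' '], ['\t'], ['\r'], ['\n'], [',', ' '], [';', ' '], ['.', ' '], ['-'],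
   ['!', ' '], ['?', ' '], [')', ' '], [']', ' '], ['}', ' ']]

lemma any_endswith_iff (s : List Char) :
    (pvBoundaryA.any fun b => PySem.Str.endswith (String.ofList s) b) = true
      ↔ ∃ bl ∈ pvBoundaryL, bl <:+ s := by
  rw [List.any_eq_true]
  constructor
  · rintro ⟨b, hb, h⟩
    rw [PySem.Str.endswith_eq, String.toList_ofList] at h
    refine ⟨b.toList, ?_, (PySem.Chars.endswith_iff _ _).1 h⟩
    fin_cases hb <;> decide
  · rintro ⟨bl, hbl, h⟩
    have hpick : ∀ bl ∈ pvBoundaryL, ∃ b ∈ pvBoundaryA, b.toList = bl := by decide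
    obtain ⟨b, hb, rfl⟩ := hpick bl hbl
    exact ⟨b, hb, by
      rw [PySem.Str.endswith_eq, String.toList_ofList]
      exact (PySem.Chars.endswith_iff _ _).2 h⟩

-- A's `any endswith` test on a string is: the last character is a breaker.
lemma endsAny (s : List Char) :
    (pvBoundaryA.any fun b => PySem.Str.endswith (String.ofList s) b) =
      (match s.getLast? with
       | some c => decide (c ∈ pvBreakers)
       | none => false) := by
  induction s using List.reverseRecOn with
  | nil => decide
  | append_singleton t a _ =>
    simp only [List.getLast?_append_of_ne_nil _ (by simp : [a] ≠ ([] : List Char)),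
      List.getLast?_singleton]
    by_cases ha : a ∈ pvBreakers
    · simp only [ha, decide_true]
      refine (any_endswith_iff _).mpr ⟨[a], ?_, ⟨t, rfl⟩⟩
      fin_cases ha <;> decide
    · simp only [ha, decide_false]
      have hfalse : ¬ ((pvBoundaryA.any fun b =>
          PySem.Str.endswith (String.ofList (t ++ [a])) b) = true) := by
        rw [any_endswith_iff]
        rintro ⟨bl, hbl, hsuf⟩
        have ha' : ¬a = ' ' ∧ ¬a = '\t' ∧ ¬a = '\r' ∧ ¬a = '\n' ∧ ¬a = '-' := by
          simpa [pvBreakers] using ha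
        fin_cases hbl <;>
          (obtain ⟨u, hu⟩ := hsuf
           have h1 := congrArg List.getLast? hu
           rw [List.getLast?_append_of_ne_nil _ (by simp),
             List.getLast?_append_of_ne_nil _ (by simp : [a] ≠ ([] : List Char))] at h1
           simp at h1
           first
             | exact ha'.1 h1.symm
             | exact ha'.2.1 h1.symm
             | exact ha'.2.2.1 h1.symm
             | exact ha'.2.2.2.1 h1.symm
             | exact ha'.2.2.2.2 h1.symm)
      simpa using hfalse

-- The condition A evaluates on its state.
def pvCondA (bits : List String) : Bool :=
  bits.isEmpty || pvBoundaryA.any (fun b => PySem.Str.endswith (bits.headD "") b)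

lemma pvStepA_eq (bits : List String) (c : Char) :
    pvStepA bits c =
      if pvCondA bits then ((("" : String).push c) :: bits)
      else (((bits.headD "").push c) :: bits.tail) := by
  by_cases h : pvCondA bits = true
  · unfold pvStepA pvCondA at *
    rw [if_pos h, if_pos h]
    simp
  · unfold pvStepA pvCondA at *
    rw [if_neg h, if_neg (by simpa using h)]

lemma ofList_push (s : List Char) (c : Char) :
    (String.ofList s).push c = String.ofList (s ++ [c]) := by
  have h : ((String.ofList s).push c).toList = s ++ [c] := by simp
  have h2 := congrArg String.ofList h
  rwa [String.ofList_toList] at h2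

lemma push_empty (c : Char) : ("" : String).push c = String.ofList [c] := by
  simpa using ofList_push [] c

lemma condA_cons (s : List Char) (rest : List String) :
    pvCondA (String.ofList s :: rest) =
      (match s.getLast? with
       | some c => decide (c ∈ pvBreakers)
       | none => false) := by
  simp only [pvCondA, List.isEmpty_cons, List.headD_cons, Bool.false_or]
  exact endsAny s

-- A's fold computes the reference segmentation.
lemma foldA (l : List Char) :
    (∀ bits, pvCondA bits = true →
      (l.foldl pvStepA bits).reverse = bits.reverse ++ (pvSegs l).map String.ofList)
    ∧ (∀ s rest, pvCondA (String.ofList s :: rest) = false →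
      (l.foldl pvStepA (String.ofList s :: rest)).reverse
        = rest.reverse ++ (pvGlue s (pvSegs l)).map String.ofList) := by
  induction l with
  | nil =>
    exact ⟨fun bits _ => by simp [pvSegs], fun s rest _ => by simp [pvGlue, pvSegs]⟩
  | cons c l ih =>
    constructor
    · intro bits hb
      rw [List.foldl_cons, pvStepA_eq, if_pos hb, push_empty]
      by_cases hc : c ∈ pvBreakers
      · have hcond : pvCondA (String.ofList [c] :: bits) = true := by
          rw [condA_cons]; simpa using hc
        rw [ih.1 _ hcond]
        simp [pvSegs, hc]
      · have hcond : pvCondA (String.ofList [c] :: bits) = false := by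
          rw [condA_cons]; simpa using hc
        rw [ih.2 _ _ hcond, pvSegs_cons_not c l hc]
    · intro s rest hb
      rw [List.foldl_cons, pvStepA_eq, if_neg (by simp [hb]), List.headD_cons, List.tail_cons,
        ofList_push]
      by_cases hc : c ∈ pvBreakers
      · have hcond : pvCondA (String.ofList (s ++ [c]) :: rest) = true := by
          rw [condA_cons,
            List.getLast?_append_of_ne_nil _ (by simp : [c] ≠ ([] : List Char))]
          simpa using hc
        rw [ih.1 _ hcond]
        simp [pvSegs, hc, pvGlue]
      · have hcond : pvCondA (String.ofList (s ++ [c]) :: rest) = false := by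
          rw [condA_cons,
            List.getLast?_append_of_ne_nil _ (by simp : [c] ≠ ([] : List Char))]
          simpa using hc
        rw [ih.2 _ _ hcond, pvSegs_cons_not c l hc, pvGlue_glue]

lemma portA_eq_full (string : String) :
    explode_on_any_py string = (pvSegs string.toList).map String.ofList := by
  unfold explode_on_any_py
  simpa using (foldA string.toList).1 [] (by decide)

-- ---- B side ----

-- Nat-valued cut positions, structurally.
def pvNatCuts : List Char → List Nat
  | [] => []
  | c :: l => (if c ∈ pvBreakers then [1] else []) ++ (pvNatCuts l).map (· + 1)

lemma natCuts_pos (l : List Char) : ∀ k ∈ pvNatCuts l, 1 ≤ k := by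
  induction l with
  | nil => simp [pvNatCuts]
  | cons c l ih =>
    intro k hk
    simp only [pvNatCuts, List.mem_append, List.mem_map] at hk
    rcases hk with hk | ⟨j, _, rfl⟩
    · split at hk <;> simp_all
    · omega

lemma cutsAux (l : List Char) (s : Nat) :
    (PySem.List.enumerate l (s : Int)).filterMap
        (fun p => if p.2 ∈ pvBreakers then some (p.1 + 1) else none)
      = (pvNatCuts l).map (fun k => ((k + s : Nat) : Int)) := by
  induction l generalizing s with
  | nil => simp [PySem.List.enumerate_nil, pvNatCuts]
  | cons c l ih =>
    rw [PySem.List.enumerate_cons,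
      show ((s : Int) + 1) = ((s + 1 : Nat) : Int) from by push_cast; ring,
      List.filterMap_cons, ih (s + 1)]
    by_cases hc : c ∈ pvBreakers
    · simp only [hc, if_pos, pvNatCuts, List.map_cons, List.map_map, List.singleton_append]
      congr 1
      · push_cast; ring
      · apply List.map_congr_left; intro k _
        simp only [Function.comp_apply]
        omega
    · simp only [hc, pvNatCuts, List.map_map, List.nil_append, if_false]
      apply List.map_congr_left; intro k _
      simp only [Function.comp_apply]
      omega

lemma pvCuts_eq (l : List Char) :
    pvCuts l = (pvNatCuts l).map (fun k => ((k : Nat) : Int)) := by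
  have h := cutsAux l 0
  simpa [pvCuts] using h

lemma chop_shift (c : Char) (l : List Char) (as bs : List Nat) :
    (((as.map (· + 1)).zip (bs.map (· + 1))).filterMap
      (fun p : Nat × Nat => if p.1 < p.2 then some (((c :: l).drop p.1).take (p.2 - p.1)) else none))
    = (as.zip bs).filterMap
        (fun p : Nat × Nat => if p.1 < p.2 then some ((l.drop p.1).take (p.2 - p.1)) else none) := by
  rw [List.zip_map, List.filterMap_map]
  congr 1
  funext p
  rcases p with ⟨a, b⟩
  by_cases h : a < b
  · simp [h, Nat.add_sub_add_right]
  · simp [h]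

lemma chopN (l : List Char) :
    ((0 :: pvNatCuts l).zip (pvNatCuts l ++ [l.length])).filterMap
      (fun p : Nat × Nat => if p.1 < p.2 then some ((l.drop p.1).take (p.2 - p.1)) else none)
    = pvSegs l := by
  induction l with
  | nil => rfl
  | cons c l ih =>
    by_cases hc : c ∈ pvBreakers
    · have hcuts : pvNatCuts (c :: l) = 1 :: (pvNatCuts l).map (· + 1) := by
        simp [pvNatCuts, hc]
      rw [hcuts, List.length_cons, List.cons_append, List.zip_cons_cons,
        show (1 : Nat) :: (pvNatCuts l).map (· + 1) = ((0 :: pvNatCuts l).map (· + 1)) from by simp,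
        show (pvNatCuts l).map (· + 1) ++ [l.length + 1]
          = ((pvNatCuts l ++ [l.length]).map (· + 1)) from by simp,
        List.filterMap_cons, chop_shift, ih]
      simp [pvSegs, hc]
    · have hcuts : pvNatCuts (c :: l) = (pvNatCuts l).map (· + 1) := by
        simp [pvNatCuts, hc]
      rw [hcuts, List.length_cons, pvSegs_cons_not c l hc]
      cases hks : pvNatCuts l with
      | nil =>
        rw [hks] at ih
        simp only [List.nil_append] at ih
        simp only [List.map_nil, List.nil_append]
        rcases Nat.eq_zero_or_pos l.length with h0 | hpos
        · have hl : l = [] := List.length_eq_zero_iff.mp h0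
          subst hl
          rfl
        · have hseg : pvSegs l = [l] := by
            rw [← ih]
            simp [hpos, List.take_length]
          rw [hseg]
          simp [pvGlue, List.take_succ_cons]
      | cons k ks' =>
        have hk : 0 < k := natCuts_pos l k (by rw [hks]; exact List.mem_cons_self)
        rw [hks] at ih
        rw [List.map_cons, List.cons_append, List.zip_cons_cons,
          show (k + 1) :: ks'.map (· + 1) = ((k :: ks').map (· + 1)) from by simp,
          show ks'.map (· + 1) ++ [l.length + 1] = ((ks' ++ [l.length]).map (· + 1)) from by simp,
          List.filterMap_cons, chop_shift]
        rw [List.cons_append, List.zip_cons_cons, List.filterMap_cons] at ih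
        simp only [hk, if_true, Nat.sub_zero, List.drop_zero] at ih ⊢
        rw [← ih]
        simp [pvGlue, List.take_succ_cons]

lemma portB_eq_full (string : String) :
    explode_on_any_py_alt string = (pvSegs string.toList).map String.ofList := by
  show (((0 : Int) :: pvCuts string.toList).zip
        (pvCuts string.toList ++ [(string.toList.length : Int)])).filterMap
      (fun p =>
        if p.1 < p.2 then some (String.ofList (PySem.List.slice string.toList (some p.1) (some p.2)))
        else none)
    = (pvSegs string.toList).map String.ofList
  rw [pvCuts_eq]
  rw [show ((0 : Int) :: (pvNatCuts string.toList).map (fun k => ((k : Nat) : Int)))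
        = ((0 :: pvNatCuts string.toList).map (fun k => ((k : Nat) : Int))) from by simp,
      show ((pvNatCuts string.toList).map (fun k => ((k : Nat) : Int)) ++ [(string.toList.length : Int)])
        = ((pvNatCuts string.toList ++ [string.toList.length]).map (fun k => ((k : Nat) : Int))) from by simp,
      List.zip_map, List.filterMap_map, ← chopN string.toList, List.map_filterMap]
  congr 1
  funext p
  rcases p with ⟨a, b⟩
  by_cases h : a < b
  · simp [Prod.map, h, PySem.List.slice_natCast]
  · simp [Prod.map, h]

-- ===== VERDICT (by name: the statement is the Claim_ definition above) =====
theorem explode_on_any_py_spec : Claim_equal_explode_on_any_py := by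
  intro s _
  unfold Spec_explode_on_any_py
  rw [portA_eq_full, portB_eq_full]
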